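-- pv_equiv track=rewrite | github.com/Yawn-Sean/Daily_CF_Problems | daily_problems/2024/11/1111/personal_submission/cf1280b_liryc.py | solve
-- ===== SOURCE A (Python) =====
-- def solve(n: int, m: int, grid):
--     a1 = [0] * n
--     a2 = [0] * m
--
--     f0 = True
--     f5 = True
--
--     for i in range(n):
--         for j in range(m):
--             if grid[i][j] == 'A':
--                 a1[i] += 1
--                 a2[j] += 1
--                 f5 = False
--             else:
--                 f0 = False
--
--     if f0:
--         return '0'
--     elif f5:
--         return 'MORTAL'
--     elif a1[0] == m or a1[n - 1] == m or a2[0] == n or a2[m - 1] == n: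
--         return '1'
--     elif grid[0][0] == 'A' or grid[0][m - 1] == 'A' or grid[n - 1][0] == 'A' or grid[n - 1][m - 1] == 'A' or max(a1) == m or max(a2) == n:
--         return '2'
--     elif a1[0] or a1[n - 1] or a2[0] or a2[m - 1]:
--         return '3'
--     else:
--         return '4'
-- ===== SOURCE B (Python) =====
-- def solve(n: int, m: int, grid):
--     # Minimum-cost-over-candidate-moves formulation: every usable move has a
--     # cost (corner cell 2, other border cell 3, interior cell 4, full border
--     # line 1, full inner line 2); take the minimum over all available moves.
--     if all(grid[i][j] == 'A' for i in range(n) for j in range(m)):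
--         return '0'
--     cells = [(i, j) for i in range(n) for j in range(m) if grid[i][j] == 'A']
--     if not cells:
--         return 'MORTAL'
--     best = 4
--     for i, j in cells:
--         on_row_edge = i == 0 or i == n - 1
--         on_col_edge = j == 0 or j == m - 1
--         cost = 2 if (on_row_edge and on_col_edge) else 3 if (on_row_edge or on_col_edge) else 4
--         best = min(best, cost)
--     for i in range(n):
--         if all(grid[i][j] == 'A' for j in range(m)):
--             best = min(best, 1 if (i == 0 or i == n - 1) else 2)
--     for j in range(m):
--         if all(grid[i][j] == 'A' for i in range(n)):
--             best = min(best, 1 if (j == 0 or j == m - 1) else 2)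
--     return str(best)
-- ===== Notes on version B (the rewrite author's own statement) =====
-- stated objective: alternative
-- what changed: Replaces A's count-arrays + fixed decision cascade by an optimization formulation: enumerate the candidate moves (each 'A' cell costs 2/3/4 by position, each full line costs 1/2) and return the minimum cost, with '0'/'MORTAL' for the all-A/no-A grids.
import Mathlib
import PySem

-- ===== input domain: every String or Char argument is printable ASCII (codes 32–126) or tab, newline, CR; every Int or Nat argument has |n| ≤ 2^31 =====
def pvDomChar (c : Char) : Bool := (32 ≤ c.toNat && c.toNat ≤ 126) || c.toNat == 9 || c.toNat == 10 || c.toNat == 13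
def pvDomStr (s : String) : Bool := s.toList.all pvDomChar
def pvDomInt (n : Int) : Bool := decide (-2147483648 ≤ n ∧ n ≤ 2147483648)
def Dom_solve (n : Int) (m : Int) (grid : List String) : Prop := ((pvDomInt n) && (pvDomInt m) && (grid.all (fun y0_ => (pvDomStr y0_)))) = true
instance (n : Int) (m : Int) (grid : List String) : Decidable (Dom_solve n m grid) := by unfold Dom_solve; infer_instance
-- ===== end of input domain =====

-- B replaces A's count arrays + fixed decision cascade by an optimization formulation:
-- enumerate candidate moves ('A' cell costs 2/3/4 by position, full line costs 1/2) and
-- return the minimum cost (objective: alternative algorithm, same asymptotic cost).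

-- ===== PORT A =====
def solveCell (grid : List String) (i j : Int) : Option Char :=
  (PySem.List.pyGet? grid i).bind (fun s => PySem.Str.pyGet? s j)

def solveStepA (grid : List String) (i : Int)
    (st : List Int × List Int × Bool × Bool) (j : Int) :
    List Int × List Int × Bool × Bool :=
  match solveCell grid i j with
  | some c =>
      if c = 'A' then
        (PySem.List.pySetD st.1 i (PySem.List.pyGetD st.1 i 0 + 1),
         PySem.List.pySetD st.2.1 j (PySem.List.pyGetD st.2.1 j 0 + 1),
         st.2.2.1, false)
      else (st.1, st.2.1, false, st.2.2.2)
  | none => st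

def solve (n : Int) (m : Int) (grid : List String) : String :=
  let st := (PySem.List.pyRange 0 n 1).foldl
      (fun st i => (PySem.List.pyRange 0 m 1).foldl (solveStepA grid i) st)
      (List.replicate n.toNat 0, List.replicate m.toNat 0, true, true)
  let a1 := st.1
  let a2 := st.2.1
  if st.2.2.1 then "0"
  else if st.2.2.2 then "MORTAL"
  else if PySem.List.pyGetD a1 0 0 = m ∨ PySem.List.pyGetD a1 (n - 1) 0 = m
       ∨ PySem.List.pyGetD a2 0 0 = n ∨ PySem.List.pyGetD a2 (m - 1) 0 = n then "1"
  else if solveCell grid 0 0 = some 'A' ∨ solveCell grid 0 (m - 1) = some 'A'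
       ∨ solveCell grid (n - 1) 0 = some 'A' ∨ solveCell grid (n - 1) (m - 1) = some 'A'
       ∨ (PySem.List.max? a1 (fun x => x)).getD 0 = m
       ∨ (PySem.List.max? a2 (fun x => x)).getD 0 = n then "2"
  else if PySem.List.pyGetD a1 0 0 ≠ 0 ∨ PySem.List.pyGetD a1 (n - 1) 0 ≠ 0
       ∨ PySem.List.pyGetD a2 0 0 ≠ 0 ∨ PySem.List.pyGetD a2 (m - 1) 0 ≠ 0 then "3"
  else "4"

-- ===== PORT B =====
def solveAltCell (grid : List String) (i j : Int) : Option Char :=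
  (PySem.List.pyGet? grid i).bind (fun s => PySem.Str.pyGet? s j)

def solve_alt (n : Int) (m : Int) (grid : List String) : String :=
  if (PySem.List.pyRange 0 n 1).all (fun i =>
      (PySem.List.pyRange 0 m 1).all (fun j => solveAltCell grid i j == some 'A')) then "0"
  else
  let cells : List (Int × Int) :=
    (PySem.List.pyRange 0 n 1).flatMap (fun i =>
      ((PySem.List.pyRange 0 m 1).filter
        (fun j => solveAltCell grid i j == some 'A')).map (fun j => (i, j)))
  if cells = [] then "MORTAL"
  else
    let best1 : Int := cells.foldl (fun best ij =>
      let onRow : Bool := ij.1 == 0 || ij.1 == n - 1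
      let onCol : Bool := ij.2 == 0 || ij.2 == m - 1
      min best (if onRow && onCol then 2 else if onRow || onCol then 3 else 4)) 4
    let best2 : Int := (PySem.List.pyRange 0 n 1).foldl (fun best i =>
      if (PySem.List.pyRange 0 m 1).all (fun j => solveAltCell grid i j == some 'A') then
        min best (if i == 0 || i == n - 1 then 1 else 2)
      else best) best1
    let best3 : Int := (PySem.List.pyRange 0 m 1).foldl (fun best j =>
      if (PySem.List.pyRange 0 n 1).all (fun i => solveAltCell grid i j == some 'A') then
        min best (if j == 0 || j == m - 1 then 1 else 2)
      else best) best2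
    PySem.Int.toStr best3

-- ===== PRECONDITION & SPEC =====
-- Pre_solve excludes exactly the inputs on which A raises IndexError: a positive n×m frame
-- with fewer than n rows, or one of the first n rows shorter than m.
def Pre_solve (n : Int) (m : Int) (grid : List String) : Prop :=
  0 < n → 0 < m → n ≤ (grid.length : Int) ∧ ∀ s ∈ grid.take n.toNat, m ≤ (s.toList.length : Int)
instance (n : Int) (m : Int) (grid : List String) : Decidable (Pre_solve n m grid) := by
  unfold Pre_solve; infer_instance

def pvWitness_solve : Int × Int × List String := (2, 2, ["AB", "BA"])

def Spec_solve (n : Int) (m : Int) (grid : List String) (out : String) : Prop := out = solve_alt n m grid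
instance (n : Int) (m : Int) (grid : List String) (out : String) : Decidable (Spec_solve n m grid out) := by
  unfold Spec_solve; infer_instance

-- ===== CLAIM (what is proved, stated in full; the proofs are below) =====
def Claim_equal_solve : Prop := ∀ (n : Int) (m : Int) (grid : List String),
  Dom_solve n m grid → Pre_solve n m grid → Spec_solve n m grid (solve n m grid)

-- ===== LEMMAS AND PROOFS =====
def pvOk (grid : List String) (N M : Nat) : Prop :=
  N ≤ grid.length ∧ ∀ i < N, M ≤ (grid.getD i "").toList.length

def pvA (grid : List String) (i j : Nat) : Bool := (grid.getD i "").toList.getD j '?' == 'A'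

lemma pv_cell_eq (grid : List String) (N M : Nat) (hok : pvOk grid N M)
    (i j : Nat) (hi : i < N) (hj : j < M) :
    solveCell grid (i : Int) (j : Int) = some ((grid.getD i "").toList.getD j '?') := by
  have hgl : i < grid.length := lt_of_lt_of_le hi hok.1
  have hrow : j < (grid.getD i "").toList.length := lt_of_lt_of_le hj (hok.2 i hi)
  have hgd : grid.getD i "" = grid[i] := List.getD_eq_getElem grid "" hgl
  unfold solveCell
  rw [PySem.List.pyGet?_natCast, List.getElem?_eq_getElem hgl]
  simp only [Option.bind_some, PySem.Str.pyGet?_natCast]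
  rw [← hgd, List.getElem?_eq_getElem hrow, List.getD_eq_getElem _ '?' hrow]

lemma pv_set_map_range (g : Nat → Int) (Mn s : Nat) (v : Int) :
    ((List.range Mn).map g).set s v
      = (List.range Mn).map (fun t => if t = s then v else g t) := by
  apply List.ext_getElem
  · simp
  · intro i h1 h2
    simp only [List.getElem_set, List.getElem_map, List.getElem_range]
    rcases eq_or_ne s i with h | h
    · simp [h]
    · simp [h, Ne.symm h]

lemma pv_innerA (grid : List String) (N M : Nat) (hok : pvOk grid N M) (i : Nat) (hi : i < N) :
    ∀ (k s : Nat), s + k = M → ∀ (a1 : List Int) (g : Nat → Int) (f0 f5 : Bool), i < a1.length →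
    ((List.range' s k).map (fun (j : Nat) => (j : Int))).foldl (solveStepA grid (i : Int))
        (a1, (List.range M).map g, f0, f5)
    = (a1.set i (a1.getD i 0 + ((List.range' s k).countP (pvA grid i) : Int)),
       (List.range M).map (fun t => g t + if s ≤ t ∧ t < s + k ∧ pvA grid i t then 1 else 0),
       f0 && (List.range' s k).all (pvA grid i),
       f5 && !((List.range' s k).any (pvA grid i))) := by
  intro k
  induction k with
  | zero =>
    intro s hs a1 g f0 f5 ha1
    simp only [List.range'_zero, List.map_nil, List.foldl_nil, List.countP_nil, List.all_nil,
      List.any_nil, Bool.and_true, Bool.not_false]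
    have hmap : (List.range M).map
        (fun t => g t + if s ≤ t ∧ t < s + 0 ∧ pvA grid i t = true then 1 else 0)
        = (List.range M).map g := by
      apply List.map_congr_left
      intro t ht
      have : ¬(s ≤ t ∧ t < s + 0 ∧ pvA grid i t = true) := by omega
      rw [if_neg this, add_zero]
    rw [hmap, Nat.cast_zero, add_zero, List.getD_eq_getElem a1 0 ha1, List.set_getElem_self]
  | succ k ih =>
    intro s hs a1 g f0 f5 ha1
    have hsM : s < M := by omega
    rw [List.range'_succ, List.map_cons, List.foldl_cons]
    have hcell := pv_cell_eq grid N M hok i s hi hsM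
    have hgd : ((List.range M).map g).getD s 0 = g s := by
      rw [List.getD_eq_getElem _ _ (by simpa using hsM)]
      simp
    by_cases hA : pvA grid i s = true
    · have hc : (grid.getD i "").toList.getD s '?' = 'A' := by simpa [pvA] using hA
      have hstep : solveStepA grid (i : Int) (a1, (List.range M).map g, f0, f5) ((s : Nat) : Int) =
          (a1.set i (a1.getD i 0 + 1),
           (List.range M).map (fun t => if t = s then g s + 1 else g t), f0, false) := by
        simp only [solveStepA, hcell, hc, PySem.List.pySetD_natCast,
          PySem.List.pyGetD_natCast, hgd, if_true]
        rw [pv_set_map_range]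
      rw [hstep, ih (s + 1) (by omega) _ _ _ _ (by simpa using ha1)]
      refine congrArg₂ Prod.mk ?_ (congrArg₂ Prod.mk ?_ (congrArg₂ Prod.mk ?_ ?_))
      · rw [List.set_set]
        have : (a1.set i (a1.getD i 0 + 1)).getD i 0 = a1.getD i 0 + 1 := by
          rw [List.getD_eq_getElem _ 0 (by simpa using ha1),
            List.getElem_set_self (by simpa using ha1)]
        rw [this, List.countP_cons]
        simp only [hA, if_true]
        congr 1
        push_cast
        ring
      · apply List.map_congr_left
        intro t ht
        by_cases hts : t = s
        · subst hts
          have h1 : ¬(t + 1 ≤ t ∧ t < t + 1 + k ∧ pvA grid i t = true) := by omega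
          have h2 : t ≤ t ∧ t < t + (k + 1) ∧ pvA grid i t = true := ⟨le_refl t, by omega, hA⟩
          simp [h2]
        · have hiff : (s + 1 ≤ t ∧ t < s + 1 + k ∧ pvA grid i t = true)
              ↔ (s ≤ t ∧ t < s + (k + 1) ∧ pvA grid i t = true) := by
            constructor
            · rintro ⟨h1, h2, h3⟩
              exact ⟨by omega, by omega, h3⟩
            · rintro ⟨h1, h2, h3⟩
              exact ⟨by omega, by omega, h3⟩
          rw [if_neg hts, if_congr hiff rfl rfl]
      · simp [List.all_cons, hA]
      · simp [List.any_cons, hA]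
    · have hc : ¬ (grid.getD i "").toList.getD s '?' = 'A' := by simpa [pvA] using hA
      have hstep : solveStepA grid (i : Int) (a1, (List.range M).map g, f0, f5) ((s : Nat) : Int) =
          (a1, (List.range M).map g, false, f5) := by
        simp only [solveStepA, hcell, if_neg hc]
      rw [hstep, ih (s + 1) (by omega) _ _ _ _ ha1]
      refine congrArg₂ Prod.mk ?_ (congrArg₂ Prod.mk ?_ (congrArg₂ Prod.mk ?_ ?_))
      · rw [List.countP_cons]
        simp [hA]
      · apply List.map_congr_left
        intro t ht
        have hiff : (s + 1 ≤ t ∧ t < s + 1 + k ∧ pvA grid i t = true)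
            ↔ (s ≤ t ∧ t < s + (k + 1) ∧ pvA grid i t = true) := by
          constructor
          · rintro ⟨h1, h2, h3⟩
            exact ⟨by omega, by omega, h3⟩
          · rintro ⟨h1, h2, h3⟩
            refine ⟨?_, by omega, h3⟩
            rcases Nat.eq_or_lt_of_le h1 with h | h
            · exact absurd h3 (h ▸ hA)
            · omega
        rw [if_congr hiff rfl rfl]
      · simp [List.all_cons, hA]
      · simp [List.any_cons, hA]

def pvRowCnt (grid : List String) (M i : Nat) : Nat := (List.range M).countP (pvA grid i)

def pvRowAll (grid : List String) (M i : Nat) : Bool := (List.range M).all (pvA grid i)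

def pvRowAny (grid : List String) (M i : Nat) : Bool := (List.range M).any (pvA grid i)

lemma pv_pyRangeNat (b : Nat) :
    PySem.List.pyRange 0 (b : Int) 1 = (List.range' 0 b).map (fun (j : Nat) => (j : Int)) := by
  rw [PySem.List.pyRange_zero_natCast, List.range_eq_range']

lemma pv_outerA (grid : List String) (N M : Nat) (hok : pvOk grid N M) :
    ∀ (k s : Nat), s + k = N → ∀ (h g : Nat → Int) (f0 f5 : Bool),
    ((List.range' s k).map (fun (i : Nat) => (i : Int))).foldl
        (fun st i => (PySem.List.pyRange 0 (M : Int) 1).foldl (solveStepA grid i) st)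
        ((List.range N).map h, (List.range M).map g, f0, f5)
    = ((List.range N).map (fun i => h i + if s ≤ i ∧ i < s + k then (pvRowCnt grid M i : Int) else 0),
       (List.range M).map (fun j => g j + ((List.range' s k).countP (fun i => pvA grid i j) : Int)),
       f0 && (List.range' s k).all (fun i => pvRowAll grid M i),
       f5 && !((List.range' s k).any (fun i => pvRowAny grid M i))) := by
  intro k
  induction k with
  | zero =>
    intro s hs h g f0 f5
    simp only [List.range'_zero, List.map_nil, List.foldl_nil, List.countP_nil, List.all_nil,
      List.any_nil, Bool.and_true, Bool.not_false]
    refine congrArg₂ Prod.mk ?_ (congrArg₂ Prod.mk ?_ rfl)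
    · apply List.map_congr_left
      intro t ht
      have : ¬(s ≤ t ∧ t < s + 0) := by omega
      rw [if_neg this, add_zero]
    · apply List.map_congr_left
      intro t ht
      simp
  | succ k ih =>
    intro s hs h g f0 f5
    have hsN : s < N := by omega
    rw [List.range'_succ, List.map_cons, List.foldl_cons]
    rw [pv_pyRangeNat M]
    have hlen : s < ((List.range N).map h).length := by simpa using hsN
    rw [pv_innerA grid N M hok s hsN M 0 (by omega) _ g f0 f5 hlen]
    have hset : ((List.range N).map h).set s (((List.range N).map h).getD s 0
          + ((List.range' 0 M).countP (pvA grid s) : Int))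
        = (List.range N).map (fun t => if t = s then h s + (pvRowCnt grid M s : Int) else h t) := by
      have hgd : ((List.range N).map h).getD s 0 = h s := by
        rw [List.getD_eq_getElem _ _ (by simpa using hsN)]
        simp
      rw [hgd, pv_set_map_range]
      congr 1
      funext t
      rw [pvRowCnt, List.range_eq_range']
    rw [hset]
    have hmapg : (List.range M).map
          (fun t => g t + if 0 ≤ t ∧ t < 0 + M ∧ pvA grid s t then 1 else 0)
        = (List.range M).map (fun t => g t + if pvA grid s t then 1 else 0) := by
      apply List.map_congr_left
      intro t ht
      have htM : t < M := List.mem_range.mp ht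
      by_cases hA : pvA grid s t = true
      · have : 0 ≤ t ∧ t < 0 + M ∧ pvA grid s t = true := ⟨Nat.zero_le t, by omega, hA⟩
        rw [if_pos this, if_pos hA]
      · have : ¬(0 ≤ t ∧ t < 0 + M ∧ pvA grid s t = true) := by
          rintro ⟨-, -, h3⟩
          exact hA h3
        rw [if_neg this, if_neg hA]
    rw [hmapg, ← pv_pyRangeNat M]
    rw [ih (s + 1) (by omega) _ _ _ _]
    refine congrArg₂ Prod.mk ?_ (congrArg₂ Prod.mk ?_ (congrArg₂ Prod.mk ?_ ?_))
    · apply List.map_congr_left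
      intro t ht
      by_cases hts : t = s
      · subst hts
        have h1 : ¬(t + 1 ≤ t ∧ t < t + 1 + k) := by omega
        have h2 : t ≤ t ∧ t < t + (k + 1) := ⟨le_refl t, by omega⟩
        rw [if_pos rfl, if_neg h1, if_pos h2, add_zero]
      · have hiff : (s + 1 ≤ t ∧ t < s + 1 + k) ↔ (s ≤ t ∧ t < s + (k + 1)) := by omega
        rw [if_neg hts, if_congr hiff rfl rfl]
    · apply List.map_congr_left
      intro t ht
      rw [List.countP_cons]
      by_cases hA : pvA grid s t = true
      · simp only [hA, if_true]
        push_cast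
        ring
      · simp only [hA]
        push_cast
        ring
    · simp only [List.all_cons, pvRowAll, List.range_eq_range', Bool.and_assoc]
    · rw [List.any_cons, pvRowAny, List.range_eq_range']
      cases f5 <;> cases hser : (List.range' 0 M).any (pvA grid s) <;>
        cases (List.range' (s+1) k).any (fun i => pvRowAny grid M i) <;>
          simp

def pvColCnt (grid : List String) (N j : Nat) : Nat := (List.range N).countP (fun i => pvA grid i j)

def pvColAll (grid : List String) (N j : Nat) : Bool := (List.range N).all (fun i => pvA grid i j)

def pvColAny (grid : List String) (N j : Nat) : Bool := (List.range N).any (fun i => pvA grid i j)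

def pvAllA (grid : List String) (N M : Nat) : Bool := (List.range N).all (fun i => pvRowAll grid M i)

def pvAnyA (grid : List String) (N M : Nat) : Bool := (List.range N).any (fun i => pvRowAny grid M i)

def pvLadder (grid : List String) (N M : Nat) : String :=
  if pvAllA grid N M then "0"
  else if !pvAnyA grid N M then "MORTAL"
  else if pvRowAll grid M 0 || pvRowAll grid M (N-1) || pvColAll grid N 0 || pvColAll grid N (M-1) then "1"
  else if pvA grid 0 0 || pvA grid 0 (M-1) || pvA grid (N-1) 0 || pvA grid (N-1) (M-1)
       || (List.range N).any (pvRowAll grid M) || (List.range M).any (pvColAll grid N) then "2"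
  else if pvRowAny grid M 0 || pvRowAny grid M (N-1) || pvColAny grid N 0 || pvColAny grid N (M-1) then "3"
  else "4"

lemma pv_max_eq (N M : Nat) (f : Nat → Nat) (hN : 0 < N) (hb : ∀ i < N, f i ≤ M) :
    ((PySem.List.max? ((List.range N).map (fun i => (f i : Int))) (fun x => x)).getD 0 = (M : Int))
    ↔ (∃ i < N, f i = M) := by
  set l := (List.range N).map (fun i => (f i : Int)) with hl
  have hne : l ≠ [] := by
    simp [hl, List.map_eq_nil_iff, List.range_eq_nil]
    omega
  cases hmax : PySem.List.max? l (fun x => x) with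
  | none => exact absurd ((PySem.List.max?_eq_none_iff l _).mp hmax) hne
  | some v =>
    have hvmem := PySem.List.max?_mem hmax
    have hvmax := PySem.List.max?_isMax hmax
    obtain ⟨i0, hi0, hv⟩ : ∃ i < N, (f i : Int) = v := by
      rw [hl] at hvmem
      simp only [List.mem_map, List.mem_range] at hvmem
      obtain ⟨i, hi, hfi⟩ := hvmem
      exact ⟨i, hi, hfi⟩
    simp only [Option.getD_some]
    constructor
    · intro hveq
      refine ⟨i0, hi0, ?_⟩
      have : (f i0 : Int) = (M : Int) := by rw [hv, hveq]
      exact_mod_cast this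
    · rintro ⟨i, hi, hfi⟩
      have h1 : (M : Int) ≤ v := by
        have : ((f i : Int)) ≤ v := hvmax _ (by simp [hl, List.mem_map]; exact ⟨i, hi, rfl⟩)
        rwa [hfi] at this
      have h2 : v ≤ (M : Int) := by
        rw [← hv]
        exact_mod_cast hb i0 hi0
      omega

lemma pv_rowcnt_le (grid : List String) (M i : Nat) : pvRowCnt grid M i ≤ M := by
  have := List.countP_le_length (p := pvA grid i) (l := List.range M)
  simpa [pvRowCnt] using this

lemma pv_colcnt_le (grid : List String) (N j : Nat) : pvColCnt grid N j ≤ N := by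
  have := List.countP_le_length (p := fun i => pvA grid i j) (l := List.range N)
  simpa [pvColCnt] using this

lemma pv_rowcnt_eq_iff (grid : List String) (M i : Nat) :
    pvRowCnt grid M i = M ↔ pvRowAll grid M i = true := by
  rw [pvRowCnt, pvRowAll]
  constructor
  · intro h
    rw [List.all_eq_true]
    intro a ha
    refine List.countP_eq_length.mp ?_ a ha
    simpa using h
  · intro h
    have := List.countP_eq_length.mpr (List.all_eq_true.mp h)
    simpa using this

lemma pv_colcnt_eq_iff (grid : List String) (N j : Nat) :
    pvColCnt grid N j = N ↔ pvColAll grid N j = true := by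
  rw [pvColCnt, pvColAll]
  constructor
  · intro h
    rw [List.all_eq_true]
    intro a ha
    refine List.countP_eq_length (p := fun i => pvA grid i j) |>.mp ?_ a ha
    simpa using h
  · intro h
    have := List.countP_eq_length.mpr (List.all_eq_true.mp h)
    simpa using this

lemma pv_rowcnt_ne_iff (grid : List String) (M i : Nat) :
    pvRowCnt grid M i ≠ 0 ↔ pvRowAny grid M i = true := by
  rw [pvRowCnt, pvRowAny, Ne, List.countP_eq_zero, List.any_eq_true]
  push_neg
  simp

lemma pv_colcnt_ne_iff (grid : List String) (N j : Nat) :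
    pvColCnt grid N j ≠ 0 ↔ pvColAny grid N j = true := by
  rw [pvColCnt, pvColAny, Ne, List.countP_eq_zero, List.any_eq_true]
  push_neg
  simp

lemma pv_stA (grid : List String) (N M : Nat) (hok : pvOk grid N M) :
    (PySem.List.pyRange 0 (N : Int) 1).foldl
      (fun st i => (PySem.List.pyRange 0 (M : Int) 1).foldl (solveStepA grid i) st)
      (List.replicate N 0, List.replicate M 0, true, true)
    = ((List.range N).map (fun i => (pvRowCnt grid M i : Int)),
       (List.range M).map (fun j => (pvColCnt grid N j : Int)),
       pvAllA grid N M, !pvAnyA grid N M) := by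
  have hrep1 : (List.replicate N (0:Int)) = (List.range N).map (fun _ => (0:Int)) := by
    simp [List.map_const']
  have hrep2 : (List.replicate M (0:Int)) = (List.range M).map (fun _ => (0:Int)) := by
    simp [List.map_const']
  rw [hrep1, hrep2, pv_pyRangeNat N,
    pv_outerA grid N M hok N 0 (by omega) (fun _ => 0) (fun _ => 0) true true]
  refine congrArg₂ Prod.mk ?_ (congrArg₂ Prod.mk ?_ (congrArg₂ Prod.mk ?_ ?_))
  · apply List.map_congr_left
    intro t ht
    have : (0 ≤ t ∧ t < 0 + N) := ⟨Nat.zero_le t, by simpa using List.mem_range.mp ht⟩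
    rw [if_pos this, zero_add]
  · apply List.map_congr_left
    intro t ht
    rw [zero_add, pvColCnt, List.range_eq_range']
  · rw [Bool.true_and, pvAllA, List.range_eq_range']
  · rw [Bool.true_and, pvAnyA, List.range_eq_range']

set_option maxHeartbeats 1000000 in
lemma pv_solveA_eq_ladder (grid : List String) (N M : Nat) (hok : pvOk grid N M)
    (hN : 0 < N) (hM : 0 < M) :
    solve (N : Int) (M : Int) grid = pvLadder grid N M := by
  have hst := pv_stA grid N M hok
  simp only [solve, Int.toNat_natCast]
  simp only [hst]
  have hNL : ((N : Int) - 1) = ((N - 1 : Nat) : Int) := by omega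
  have hML : ((M : Int) - 1) = ((M - 1 : Nat) : Int) := by omega
  have hg10 : PySem.List.pyGetD ((List.range N).map (fun i => ((pvRowCnt grid M i : Nat) : Int))) 0 0
      = ((pvRowCnt grid M 0 : Nat) : Int) := by
    rw [PySem.List.pyGetD_zero, List.getD_eq_getElem _ _ (by simpa using hN)]
    simp
  have hg1L : PySem.List.pyGetD ((List.range N).map (fun i => ((pvRowCnt grid M i : Nat) : Int))) ((N : Int) - 1) 0
      = ((pvRowCnt grid M (N - 1) : Nat) : Int) := by
    rw [hNL, PySem.List.pyGetD_natCast, List.getD_eq_getElem _ _ (by simp; omega)]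
    simp
  have hg20 : PySem.List.pyGetD ((List.range M).map (fun j => ((pvColCnt grid N j : Nat) : Int))) 0 0
      = ((pvColCnt grid N 0 : Nat) : Int) := by
    rw [PySem.List.pyGetD_zero, List.getD_eq_getElem _ _ (by simpa using hM)]
    simp
  have hg2L : PySem.List.pyGetD ((List.range M).map (fun j => ((pvColCnt grid N j : Nat) : Int))) ((M : Int) - 1) 0
      = ((pvColCnt grid N (M - 1) : Nat) : Int) := by
    rw [hML, PySem.List.pyGetD_natCast, List.getD_eq_getElem _ _ (by simp; omega)]
    simp
  have hc00 : solveCell grid 0 0 = some ((grid.getD 0 "").toList.getD 0 '?') := by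
    simpa using pv_cell_eq grid N M hok 0 0 hN hM
  have hc0M : solveCell grid 0 ((M : Int) - 1) = some ((grid.getD 0 "").toList.getD (M - 1) '?') := by
    rw [hML]
    simpa using pv_cell_eq grid N M hok 0 (M - 1) hN (by omega)
  have hcN0 : solveCell grid ((N : Int) - 1) 0 = some ((grid.getD (N - 1) "").toList.getD 0 '?') := by
    rw [hNL]
    simpa using pv_cell_eq grid N M hok (N - 1) 0 (by omega) hM
  have hcNM : solveCell grid ((N : Int) - 1) ((M : Int) - 1)
      = some ((grid.getD (N - 1) "").toList.getD (M - 1) '?') := by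
    rw [hNL, hML]
    exact pv_cell_eq grid N M hok (N - 1) (M - 1) (by omega) (by omega)
  have hmax1 : (((PySem.List.max? ((List.range N).map (fun i => ((pvRowCnt grid M i : Nat) : Int)))
        (fun x => x)).getD 0 = (M : Int)))
      ↔ ((List.range N).any (pvRowAll grid M) = true) := by
    rw [pv_max_eq N M _ hN (fun i _ => pv_rowcnt_le grid M i)]
    simp only [List.any_eq_true, List.mem_range]
    constructor
    · rintro ⟨i, hi, hcnt⟩
      exact ⟨i, hi, (pv_rowcnt_eq_iff grid M i).mp hcnt⟩
    · rintro ⟨i, hi, hall⟩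
      exact ⟨i, hi, (pv_rowcnt_eq_iff grid M i).mpr hall⟩
  have hmax2 : (((PySem.List.max? ((List.range M).map (fun j => ((pvColCnt grid N j : Nat) : Int)))
        (fun x => x)).getD 0 = (N : Int)))
      ↔ ((List.range M).any (pvColAll grid N) = true) := by
    rw [pv_max_eq M N _ hM (fun j _ => pv_colcnt_le grid N j)]
    simp only [List.any_eq_true, List.mem_range]
    constructor
    · rintro ⟨j, hj, hcnt⟩
      exact ⟨j, hj, (pv_colcnt_eq_iff grid N j).mp hcnt⟩
    · rintro ⟨j, hj, hall⟩
      exact ⟨j, hj, (pv_colcnt_eq_iff grid N j).mpr hall⟩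
  rw [hg10, hg1L, hg20, hg2L, hc00, hc0M, hcN0, hcNM, pvLadder]
  have hC1 : (((pvRowCnt grid M 0 : Nat) : Int) = (M : Int) ∨ ((pvRowCnt grid M (N-1) : Nat) : Int) = (M : Int)
        ∨ ((pvColCnt grid N 0 : Nat) : Int) = (N : Int) ∨ ((pvColCnt grid N (M-1) : Nat) : Int) = (N : Int))
      ↔ (pvRowAll grid M 0 || pvRowAll grid M (N-1) || pvColAll grid N 0 || pvColAll grid N (M-1)) = true := by
    simp only [Bool.or_eq_true, Nat.cast_inj, pv_rowcnt_eq_iff, pv_colcnt_eq_iff, or_assoc]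
  have hC2 : (some ((grid.getD 0 "").toList.getD 0 '?') = some 'A'
        ∨ some ((grid.getD 0 "").toList.getD (M-1) '?') = some 'A'
        ∨ some ((grid.getD (N-1) "").toList.getD 0 '?') = some 'A'
        ∨ some ((grid.getD (N-1) "").toList.getD (M-1) '?') = some 'A'
        ∨ ((PySem.List.max? ((List.range N).map (fun i => ((pvRowCnt grid M i : Nat) : Int))) (fun x => x)).getD 0 = (M : Int))
        ∨ ((PySem.List.max? ((List.range M).map (fun j => ((pvColCnt grid N j : Nat) : Int))) (fun x => x)).getD 0 = (N : Int)))
      ↔ (pvA grid 0 0 || pvA grid 0 (M-1) || pvA grid (N-1) 0 || pvA grid (N-1) (M-1)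
        || (List.range N).any (pvRowAll grid M) || (List.range M).any (pvColAll grid N)) = true := by
    simp only [Bool.or_eq_true, hmax1, hmax2, Option.some_inj, pvA, beq_iff_eq, or_assoc]
  have hC3 : (((pvRowCnt grid M 0 : Nat) : Int) ≠ 0 ∨ ((pvRowCnt grid M (N-1) : Nat) : Int) ≠ 0
        ∨ ((pvColCnt grid N 0 : Nat) : Int) ≠ 0 ∨ ((pvColCnt grid N (M-1) : Nat) : Int) ≠ 0)
      ↔ (pvRowAny grid M 0 || pvRowAny grid M (N-1) || pvColAny grid N 0 || pvColAny grid N (M-1)) = true := by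
    simp only [Bool.or_eq_true, Nat.cast_ne_zero, pv_rowcnt_ne_iff, pv_colcnt_ne_iff, or_assoc]
  by_cases h0 : pvAllA grid N M = true
  · rw [if_pos h0, if_pos h0]
  · rw [if_neg h0, if_neg h0]
    by_cases h1 : (!pvAnyA grid N M) = true
    · rw [if_pos h1, if_pos h1]
    · rw [if_neg h1, if_neg h1]
      by_cases hb1 : (pvRowAll grid M 0 || pvRowAll grid M (N-1) || pvColAll grid N 0 || pvColAll grid N (M-1)) = true
      · rw [if_pos (hC1.mpr hb1), if_pos hb1]
      · rw [if_neg (fun hp => hb1 (hC1.mp hp)), if_neg hb1]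
        by_cases hb2 : (pvA grid 0 0 || pvA grid 0 (M-1) || pvA grid (N-1) 0 || pvA grid (N-1) (M-1)
            || (List.range N).any (pvRowAll grid M) || (List.range M).any (pvColAll grid N)) = true
        · rw [if_pos (hC2.mpr hb2), if_pos hb2]
        · rw [if_neg (fun hp => hb2 (hC2.mp hp)), if_neg hb2]
          by_cases hb3 : (pvRowAny grid M 0 || pvRowAny grid M (N-1) || pvColAny grid N 0 || pvColAny grid N (M-1)) = true
          · rw [if_pos (hC3.mpr hb3), if_pos hb3]
          · rw [if_neg (fun hp => hb3 (hC3.mp hp)), if_neg hb3]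

lemma pv_altcell (grid : List String) (i j : Int) :
    solveAltCell grid i j = solveCell grid i j := rfl

-- the cell comprehension of B, over Nat indices

def pvCellsNat (grid : List String) (N M : Nat) : List (Int × Int) :=
  (List.range N).flatMap (fun i =>
    ((List.range M).filter (pvA grid i)).map (fun (j : Nat) => ((i : Int), (j : Int))))

lemma pv_cells_eq (grid : List String) (N M : Nat) (hok : pvOk grid N M) :
    (PySem.List.pyRange 0 (N : Int) 1).flatMap (fun i =>
      ((PySem.List.pyRange 0 (M : Int) 1).filter
        (fun j => solveAltCell grid i j == some 'A')).map (fun j => (i, j)))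
    = pvCellsNat grid N M := by
  rw [PySem.List.pyRange_zero_natCast N, List.flatMap_map, pvCellsNat]
  apply List.flatMap_congr
  intro i hi
  have hiN : i < N := List.mem_range.mp hi
  rw [PySem.List.pyRange_zero_natCast M, List.filter_map]
  rw [List.filter_congr (q := pvA grid i) ?_]
  · rw [List.map_map]
    rfl
  · intro j hj
    have hjM : j < M := List.mem_range.mp hj
    show (solveAltCell grid (i : Int) (j : Int) == some 'A') = pvA grid i j
    rw [pv_altcell, pv_cell_eq grid N M hok i j hiN hjM]
    rw [Bool.eq_iff_iff, beq_iff_eq, Option.some_inj]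
    simp [pvA]

lemma pv_cells_len (grid : List String) (N M : Nat) :
    (pvCellsNat grid N M).length = ((List.range N).map (fun i => pvRowCnt grid M i)).sum := by
  rw [pvCellsNat, List.length_flatMap]
  congr 1
  apply List.map_congr_left
  intro i hi
  simp [pvRowCnt, List.countP_eq_length_filter]

lemma pv_cells_empty_iff (grid : List String) (N M : Nat) :
    (pvCellsNat grid N M = []) ↔ pvAnyA grid N M = false := by
  rw [← List.length_eq_zero_iff, pv_cells_len, List.sum_eq_zero_iff, pvAnyA]
  constructor
  · intro h
    rw [Bool.eq_false_iff, Ne, List.any_eq_true]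
    rintro ⟨i, hi, hany⟩
    have h0 : pvRowCnt grid M i = 0 := h _ (by simp only [List.mem_map]; exact ⟨i, hi, rfl⟩)
    exact (pv_rowcnt_ne_iff grid M i).mpr hany h0
  · intro h x hx
    simp only [List.mem_map, List.mem_range] at hx
    obtain ⟨i, hi, rfl⟩ := hx
    by_contra hne
    have := (pv_rowcnt_ne_iff grid M i).mp hne
    rw [Bool.eq_false_iff, Ne, List.any_eq_true] at h
    exact h ⟨i, List.mem_range.mpr hi, this⟩

lemma pv_foldl_cellmin {α : Type} (isC isB : α → Bool) (hCB : ∀ x, isC x = true → isB x = true) :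
    ∀ (l : List α) (c b : Bool), (c = true → b = true) →
    l.foldl (fun best x => min best (if isC x then 2 else if isB x then (3 : Int) else 4))
        (if c then 2 else if b then 3 else 4)
    = if c || l.any isC then 2 else if b || l.any isB then 3 else 4 := by
  intro l
  induction l with
  | nil =>
    intro c b hcb
    simp
  | cons x xs ih =>
    intro c b hcb
    rw [List.foldl_cons]
    have hmin : min (if c then 2 else if b then 3 else 4)
          (if isC x then 2 else if isB x then (3:Int) else 4)
        = (if c || isC x then 2 else if b || isB x then 3 else 4) := by
      by_cases hx : isC x = true
      · have hyx := hCB x hx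
        cases hc : c <;> cases hb : b <;>
          simp only [hx, hyx, if_true, Bool.true_or, Bool.or_true, Bool.false_or,
            Bool.or_false, if_false] <;> decide
      · have hx' : isC x = false := by simpa using hx
        cases hy : isB x <;> cases hc : c <;> cases hb : b <;>
          simp only [hx', hy, if_true, if_false, Bool.true_or, Bool.or_true, Bool.false_or,
            Bool.or_false] <;> decide
    rw [hmin, ih _ _ ?_]
    · rw [List.any_cons, List.any_cons]
      cases c <;> cases b <;> cases isC x <;> cases isB x <;> simp
    · intro h
      rcases Bool.or_eq_true_iff.mp h with h | h
      · exact Bool.or_eq_true_iff.mpr (Or.inl (hcb h))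
      · exact Bool.or_eq_true_iff.mpr (Or.inr (hCB x h))

lemma pv_foldl_line {α : Type} (full isB : α → Bool) :
    ∀ (l : List α) (v : Int),
    l.foldl (fun best x => if full x then min best (if isB x then 1 else 2) else best) v
    = if l.any (fun x => full x && isB x) then min v 1
      else if l.any full then min v 2 else v := by
  intro l
  induction l with
  | nil =>
    intro v
    simp
  | cons x xs ih =>
    intro v
    rw [List.foldl_cons, List.any_cons, List.any_cons]
    cases hf : full x <;> cases hb : isB x <;>
      simp only [hf, hb, Bool.true_and, Bool.false_and, Bool.true_or, Bool.false_or,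
        if_true, if_false, Bool.false_eq_true, ih] <;>
      rcases hx1 : xs.any (fun x => full x && isB x) <;>
        rcases hx2 : xs.any full <;> simp [hx1, hx2] <;> omega

lemma pv_mem_cells (grid : List String) (N M : Nat) (p : Int × Int) :
    p ∈ pvCellsNat grid N M
    ↔ ∃ i < N, ∃ j < M, pvA grid i j = true ∧ p = ((i : Int), (j : Int)) := by
  simp only [pvCellsNat, List.mem_flatMap, List.mem_map, List.mem_filter, List.mem_range]
  constructor
  · rintro ⟨i, hi, j, ⟨hj, hA⟩, rfl⟩
    exact ⟨i, hi, j, hj, hA, rfl⟩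
  · rintro ⟨i, hi, j, hj, hA, rfl⟩
    exact ⟨i, hi, j, ⟨hj, hA⟩, rfl⟩

lemma pv_anyC (grid : List String) (N M : Nat) (hN : 0 < N) (hM : 0 < M) :
    ((pvCellsNat grid N M).any (fun ij =>
        (ij.1 == 0 || ij.1 == (N : Int) - 1) && (ij.2 == 0 || ij.2 == (M : Int) - 1)))
    = (pvA grid 0 0 || pvA grid 0 (M-1) || pvA grid (N-1) 0 || pvA grid (N-1) (M-1)) := by
  rw [Bool.eq_iff_iff, List.any_eq_true]
  simp only [Bool.or_eq_true, Bool.and_eq_true, beq_iff_eq]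
  constructor
  · rintro ⟨p, hp, ⟨hr, hc⟩⟩
    obtain ⟨i, hi, j, hj, hA, rfl⟩ := (pv_mem_cells grid N M p).mp hp
    have hi' : i = 0 ∨ i = N - 1 := by
      rcases hr with h | h
      · simp only at h
        left
        exact_mod_cast h
      · simp only at h
        right
        omega
    have hj' : j = 0 ∨ j = M - 1 := by
      rcases hc with h | h
      · simp only at h
        left
        exact_mod_cast h
      · simp only at h
        right
        omega
    rcases hi' with rfl | rfl <;> rcases hj' with rfl | rfl
    · exact Or.inl (Or.inl (Or.inl hA))
    · exact Or.inl (Or.inl (Or.inr hA))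
    · exact Or.inl (Or.inr hA)
    · exact Or.inr hA
  · rintro (((h | h) | h) | h)
    · exact ⟨((0 : Nat), (0 : Nat)), (pv_mem_cells grid N M _).mpr ⟨0, hN, 0, hM, h, rfl⟩,
        ⟨Or.inl (by norm_num), Or.inl (by norm_num)⟩⟩
    · exact ⟨((0 : Nat), ((M - 1 : Nat) : Int)),
        (pv_mem_cells grid N M _).mpr ⟨0, hN, M - 1, by omega, h, rfl⟩,
        ⟨Or.inl (by norm_num), Or.inr (by omega)⟩⟩
    · exact ⟨(((N - 1 : Nat) : Int), (0 : Nat)),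
        (pv_mem_cells grid N M _).mpr ⟨N - 1, by omega, 0, hM, h, rfl⟩,
        ⟨Or.inr (by omega), Or.inl (by norm_num)⟩⟩
    · exact ⟨(((N - 1 : Nat) : Int), ((M - 1 : Nat) : Int)),
        (pv_mem_cells grid N M _).mpr ⟨N - 1, by omega, M - 1, by omega, h, rfl⟩,
        ⟨Or.inr (by omega), Or.inr (by omega)⟩⟩

lemma pv_anyB (grid : List String) (N M : Nat) (hN : 0 < N) (hM : 0 < M) :
    ((pvCellsNat grid N M).any (fun ij =>
        (ij.1 == 0 || ij.1 == (N : Int) - 1) || (ij.2 == 0 || ij.2 == (M : Int) - 1)))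
    = (pvRowAny grid M 0 || pvRowAny grid M (N-1) || pvColAny grid N 0 || pvColAny grid N (M-1)) := by
  rw [Bool.eq_iff_iff, List.any_eq_true]
  simp only [Bool.or_eq_true, beq_iff_eq, pvRowAny, pvColAny, List.any_eq_true, List.mem_range]
  constructor
  · rintro ⟨p, hp, h⟩
    obtain ⟨i, hi, j, hj, hA, rfl⟩ := (pv_mem_cells grid N M p).mp hp
    simp only at h
    rcases h with (h | h) | (h | h)
    · have : i = 0 := by exact_mod_cast h
      subst this
      exact Or.inl (Or.inl (Or.inl ⟨j, hj, hA⟩))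
    · have : i = N - 1 := by omega
      subst this
      exact Or.inl (Or.inl (Or.inr ⟨j, hj, hA⟩))
    · have : j = 0 := by exact_mod_cast h
      subst this
      exact Or.inl (Or.inr ⟨i, hi, hA⟩)
    · have : j = M - 1 := by omega
      subst this
      exact Or.inr ⟨i, hi, hA⟩
  · rintro (((⟨j, hj, hA⟩ | ⟨j, hj, hA⟩) | ⟨i, hi, hA⟩) | ⟨i, hi, hA⟩)
    · exact ⟨((0 : Nat), (j : Int)), (pv_mem_cells grid N M _).mpr ⟨0, hN, j, hj, hA, rfl⟩,
        Or.inl (Or.inl (by norm_num))⟩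
    · exact ⟨(((N - 1 : Nat) : Int), (j : Int)),
        (pv_mem_cells grid N M _).mpr ⟨N - 1, by omega, j, hj, hA, rfl⟩,
        Or.inl (Or.inr (by omega))⟩
    · exact ⟨((i : Int), (0 : Nat)), (pv_mem_cells grid N M _).mpr ⟨i, hi, 0, hM, hA, rfl⟩,
        Or.inr (Or.inl (by norm_num))⟩
    · exact ⟨((i : Int), ((M - 1 : Nat) : Int)),
        (pv_mem_cells grid N M _).mpr ⟨i, hi, M - 1, by omega, hA, rfl⟩,
        Or.inr (Or.inr (by omega))⟩

lemma pv_rowfull_bool (grid : List String) (N M : Nat) (hok : pvOk grid N M) (i : Nat) (hi : i < N) :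
    ((PySem.List.pyRange 0 (M : Int) 1).all
      (fun j => solveAltCell grid (i : Int) j == some 'A')) = pvRowAll grid M i := by
  rw [PySem.List.pyRange_zero_natCast M, List.all_map]
  rw [Bool.eq_iff_iff, List.all_eq_true, pvRowAll, List.all_eq_true]
  constructor
  · intro h j hj
    have := h j hj
    simp only [Function.comp] at this
    rw [pv_altcell, pv_cell_eq grid N M hok i j hi (List.mem_range.mp hj)] at this
    simpa [pvA] using this
  · intro h j hj
    simp only [Function.comp]
    rw [pv_altcell, pv_cell_eq grid N M hok i j hi (List.mem_range.mp hj)]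
    simpa [pvA] using h j hj

lemma pv_colfull_bool (grid : List String) (N M : Nat) (hok : pvOk grid N M) (j : Nat) (hj : j < M) :
    ((PySem.List.pyRange 0 (N : Int) 1).all
      (fun i => solveAltCell grid i (j : Int) == some 'A')) = pvColAll grid N j := by
  rw [PySem.List.pyRange_zero_natCast N, List.all_map]
  rw [Bool.eq_iff_iff, List.all_eq_true, pvColAll, List.all_eq_true]
  constructor
  · intro h i hi
    have := h i hi
    simp only [Function.comp] at this
    rw [pv_altcell, pv_cell_eq grid N M hok i j (List.mem_range.mp hi) hj] at this
    simpa [pvA] using this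
  · intro h i hi
    simp only [Function.comp]
    rw [pv_altcell, pv_cell_eq grid N M hok i j (List.mem_range.mp hi) hj]
    simpa [pvA] using h i hi

lemma pv_phase_any (P : Nat → Bool) (K : Nat) (hK : 0 < K) :
    ((List.range K).any (fun i => P i && (i == 0 || i == K - 1)))
    = (P 0 || P (K - 1)) := by
  rw [Bool.eq_iff_iff, List.any_eq_true]
  simp only [Bool.and_eq_true, Bool.or_eq_true, beq_iff_eq, List.mem_range]
  constructor
  · rintro ⟨i, hi, hP, (rfl | rfl)⟩
    · exact Or.inl hP
    · exact Or.inr hP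
  · rintro (h | h)
    · exact ⟨0, hK, h, Or.inl rfl⟩
    · exact ⟨K - 1, by omega, h, Or.inr rfl⟩

lemma pv_stage2 (grid : List String) (N M : Nat) (hok : pvOk grid N M) (hN : 0 < N) (v : Int) :
    (PySem.List.pyRange 0 (N : Int) 1).foldl (fun best i =>
      if (PySem.List.pyRange 0 (M : Int) 1).all (fun j => solveAltCell grid i j == some 'A') then
        min best (if i == 0 || i == (N : Int) - 1 then 1 else 2)
      else best) v
    = if pvRowAll grid M 0 || pvRowAll grid M (N-1) then min v 1
      else if (List.range N).any (pvRowAll grid M) then min v 2 else v := by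
  rw [PySem.List.pyRange_zero_natCast N, List.foldl_map]
  rw [PySem.List.foldl_congr_mem _ _
    (fun best (i : Nat) => if pvRowAll grid M i then
        min best (if i == 0 || i == N - 1 then 1 else 2) else best) v ?_]
  · rw [pv_foldl_line (pvRowAll grid M) (fun i => i == 0 || i == N - 1) (List.range N) v]
    rw [pv_phase_any (pvRowAll grid M) N hN]
  · intro acc i hi
    have hiN : i < N := List.mem_range.mp hi
    rw [pv_rowfull_bool grid N M hok i hiN]
    have hpos : ((i : Int) == 0 || (i : Int) == (N : Int) - 1) = (i == 0 || i == N - 1) := by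
      rw [Bool.eq_iff_iff]
      simp only [Bool.or_eq_true, beq_iff_eq]
      omega
    rw [hpos]

lemma pv_stage3 (grid : List String) (N M : Nat) (hok : pvOk grid N M) (hM : 0 < M) (v : Int) :
    (PySem.List.pyRange 0 (M : Int) 1).foldl (fun best j =>
      if (PySem.List.pyRange 0 (N : Int) 1).all (fun i => solveAltCell grid i j == some 'A') then
        min best (if j == 0 || j == (M : Int) - 1 then 1 else 2)
      else best) v
    = if pvColAll grid N 0 || pvColAll grid N (M-1) then min v 1
      else if (List.range M).any (pvColAll grid N) then min v 2 else v := by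
  rw [PySem.List.pyRange_zero_natCast M, List.foldl_map]
  rw [PySem.List.foldl_congr_mem _ _
    (fun best (j : Nat) => if pvColAll grid N j then
        min best (if j == 0 || j == M - 1 then 1 else 2) else best) v ?_]
  · rw [pv_foldl_line (pvColAll grid N) (fun j => j == 0 || j == M - 1) (List.range M) v]
    rw [pv_phase_any (pvColAll grid N) M hM]
  · intro acc j hj
    have hjM : j < M := List.mem_range.mp hj
    rw [pv_colfull_bool grid N M hok j hjM]
    have hpos : ((j : Int) == 0 || (j : Int) == (M : Int) - 1) = (j == 0 || j == M - 1) := by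
      rw [Bool.eq_iff_iff]
      simp only [Bool.or_eq_true, beq_iff_eq]
      omega
    rw [hpos]

set_option maxHeartbeats 2000000 in
lemma pv_solveB_eq_ladder (grid : List String) (N M : Nat) (hok : pvOk grid N M)
    (hN : 0 < N) (hM : 0 < M) :
    solve_alt (N : Int) (M : Int) grid = pvLadder grid N M := by
  simp only [solve_alt]
  rw [pv_cells_eq grid N M hok]
  have hallB : ((PySem.List.pyRange 0 (N : Int) 1).all (fun i =>
      (PySem.List.pyRange 0 (M : Int) 1).all (fun j => solveAltCell grid i j == some 'A')))
      = pvAllA grid N M := by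
    rw [PySem.List.pyRange_zero_natCast N, List.all_map]
    rw [Bool.eq_iff_iff, List.all_eq_true, pvAllA, List.all_eq_true]
    constructor
    · intro h i hi
      have := h i hi
      simp only [Function.comp] at this
      rwa [pv_rowfull_bool grid N M hok i (List.mem_range.mp hi)] at this
    · intro h i hi
      simp only [Function.comp]
      rw [pv_rowfull_bool grid N M hok i (List.mem_range.mp hi)]
      exact h i hi
  rw [hallB]
  by_cases hall : pvAllA grid N M = true
  · rw [if_pos hall, pvLadder, if_pos hall]
  · rw [if_neg hall, pvLadder, if_neg hall]
    by_cases hany : pvAnyA grid N M = true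
    · have hne : ¬(pvCellsNat grid N M = []) := fun he => by
        rw [(pv_cells_empty_iff grid N M).mp he] at hany
        exact absurd hany (by decide)
      rw [if_neg hne, if_neg (by simp [hany] : ¬(!pvAnyA grid N M) = true)]
      have hImp : ∀ ij : Int × Int,
          ((ij.1 == 0 || ij.1 == (N : Int) - 1) && (ij.2 == 0 || ij.2 == (M : Int) - 1)) = true →
          ((ij.1 == 0 || ij.1 == (N : Int) - 1) || (ij.2 == 0 || ij.2 == (M : Int) - 1)) = true := by
        intro ij h
        rcases Bool.and_eq_true_iff.mp h with ⟨h1, h2⟩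
        exact Bool.or_eq_true_iff.mpr (Or.inl h1)
      have hstage1 := pv_foldl_cellmin
        (fun ij : Int × Int => (ij.1 == 0 || ij.1 == (N : Int) - 1) && (ij.2 == 0 || ij.2 == (M : Int) - 1))
        (fun ij : Int × Int => (ij.1 == 0 || ij.1 == (N : Int) - 1) || (ij.2 == 0 || ij.2 == (M : Int) - 1))
        hImp (pvCellsNat grid N M) false false (fun h => h)
      simp only [Bool.false_eq_true, if_false, Bool.false_or] at hstage1
      rw [hstage1, pv_anyC grid N M hN hM, pv_anyB grid N M hN hM]
      rw [pv_stage2 grid N M hok hN, pv_stage3 grid N M hok hM]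
      cases hCC : (pvA grid 0 0 || pvA grid 0 (M-1) || pvA grid (N-1) 0 || pvA grid (N-1) (M-1)) <;>
        cases hBB : (pvRowAny grid M 0 || pvRowAny grid M (N-1) || pvColAny grid N 0 || pvColAny grid N (M-1)) <;>
          cases hR1 : (pvRowAll grid M 0 || pvRowAll grid M (N-1)) <;>
            cases hc1 : pvColAll grid N 0 <;> cases hd1 : pvColAll grid N (M-1) <;>
              cases hFR : (List.range N).any (pvRowAll grid M) <;>
                cases hFC : (List.range M).any (pvColAll grid N) <;>
                  simp only [hCC, hBB, hR1, hc1, hd1, hFR, hFC, Bool.or_false, Bool.false_or,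
                    Bool.or_true, Bool.true_or, if_true, if_false] <;> decide
    · have hanyf : pvAnyA grid N M = false := by simpa using hany
      rw [if_pos ((pv_cells_empty_iff grid N M).mpr hanyf),
        if_pos (by simp [hanyf] : (!pvAnyA grid N M) = true)]

lemma pv_foldl_const {α β : Type} (l : List α) (st : β) :
    l.foldl (fun st _ => st) st = st := by
  induction l generalizing st with
  | nil => rfl
  | cons x xs ih => rw [List.foldl_cons]; exact ih st

lemma pv_degenerate (n m : Int) (grid : List String)
    (h : n ≤ 0 ∨ m ≤ 0) : solve n m grid = "0" ∧ solve_alt n m grid = "0" := by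
  constructor
  · simp only [solve]
    rcases h with h | h
    · rw [PySem.List.pyRange_one_eq_nil h]
      simp
    · rw [PySem.List.pyRange_one_eq_nil (a := 0) (b := m) h]
      simp only [List.foldl_nil, pv_foldl_const]
      simp
  · simp only [solve_alt]
    rcases h with h | h
    · rw [PySem.List.pyRange_one_eq_nil h]
      simp
    · rw [PySem.List.pyRange_one_eq_nil (a := 0) (b := m) h]
      simp

-- ===== VERDICT (by name: the statement is the Claim_ definition above) =====
theorem solve_spec : Claim_equal_solve := by
  intro n m grid _dom hpre
  unfold Spec_solve
  by_cases hdeg : n ≤ 0 ∨ m ≤ 0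
  · obtain ⟨hA, hB⟩ := pv_degenerate n m grid hdeg
    rw [hA, hB]
  · push_neg at hdeg
    have hn' : 0 < n := hdeg.1
    have hm' : 0 < m := hdeg.2
    obtain ⟨hg, hr⟩ := hpre hn' hm'
    set N := n.toNat with hN
    set M := m.toNat with hM
    have hnN : n = (N : Int) := by omega
    have hmM : m = (M : Int) := by omega
    have hok : pvOk grid N M := by
      constructor
      · omega
      · intro i hi
        have hmem : grid.getD i "" ∈ grid.take N := by
          have hlen : i < (grid.take N).length := by simp; omega
          have hgt : (grid.take N)[i] = grid[i] := List.getElem_take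
          rw [List.getD_eq_getElem grid "" (by omega), ← hgt]
          exact List.getElem_mem hlen
        have := hr _ hmem
        omega
    rw [hnN, hmM]
    rw [pv_solveA_eq_ladder grid N M hok (by omega) (by omega),
        pv_solveB_eq_ladder grid N M hok (by omega) (by omega)]
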